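-- pv_equiv track=rewrite | github.com/KMielnik/ZadaniaC | ZadaniaPython.py | count_occurences2
-- ===== SOURCE A (Python) =====
-- def count_occurences2(sentence):
--     words = ''.join([c for c in sentence if (c.isalnum() or c.isspace())])
--     words = words.split(' ')
--     words_occurences = {}
--     for word in words:
--         if word in words_occurences:
--             words_occurences[word] += 1
--         else:
--             words_occurences[word] = 1
--
--     non_al_num_occurences = {}
--     non_al_nums = [c for c in sentence if not (c.isalnum() or c.isspace())]
--     for c in non_al_nums:
--         if c in non_al_num_occurences:
--             non_al_num_occurences[c] += 1
--         else:
--             non_al_num_occurences[c] = 1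
--
--     return {**words_occurences, **non_al_num_occurences}
-- ===== SOURCE B (Python) =====
-- def count_occurences2(sentence):
--     # single pass: buffer the current word, count words and punctuation as we go
--     word_counts = {}
--     punct_counts = {}
--     buf = ''
--     for c in sentence:
--         if c.isalnum() or c.isspace():
--             if c == ' ':
--                 word_counts[buf] = word_counts.get(buf, 0) + 1
--                 buf = ''
--             else:
--                 buf += c
--         else:
--             punct_counts[c] = punct_counts.get(c, 0) + 1
--     word_counts[buf] = word_counts.get(buf, 0) + 1
--     return {**word_counts, **punct_counts}
-- ===== Notes on version B (the rewrite author's own statement) =====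
-- stated objective: alternative
-- what changed: Replaced A's three passes (filter-and-join, split on the space character plus a counting loop, then a second filter plus counting loop) by one pass over the sentence that maintains a current-word buffer and updates the word and punctuation counters in flight.
import Mathlib
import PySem

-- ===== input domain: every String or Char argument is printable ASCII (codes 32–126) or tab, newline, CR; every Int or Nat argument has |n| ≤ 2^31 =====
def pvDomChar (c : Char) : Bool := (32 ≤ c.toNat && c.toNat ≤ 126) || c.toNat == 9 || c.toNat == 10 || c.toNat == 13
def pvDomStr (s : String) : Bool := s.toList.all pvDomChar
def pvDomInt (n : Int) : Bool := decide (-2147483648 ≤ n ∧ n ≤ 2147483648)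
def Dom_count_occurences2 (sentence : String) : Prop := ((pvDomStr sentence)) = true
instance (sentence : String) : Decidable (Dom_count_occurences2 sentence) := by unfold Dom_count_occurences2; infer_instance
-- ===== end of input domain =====

-- B replaces A's three passes (filter+join, split-on-space+count, filter+count) by one pass with a
-- current-word buffer and two counters updated in flight; same return value, proved equal below.

-- ===== PORT A =====
-- {**a, **b}: start from a, insert b's items in order (overwrite in place, new keys append)
def pvMerge (a b : PySem.Dict String Int) : PySem.Dict String Int :=
  b.items.foldl (fun d kv => d.insert kv.1 kv.2) a

def count_occurences2 (sentence : String) : List (String × Int) :=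
  let cs := sentence.toList
  let wordsChars := cs.filter (fun c => PySem.Chars.isalnum c || PySem.Chars.isspace c)
  let words := (PySem.Chars.splitOn wordsChars [' ']).map String.ofList
  let wd := words.foldl (fun d w =>
      if d.contains w then d.insert w (d.getD w 0 + 1) else d.insert w 1) PySem.Dict.empty
  let nonAlNums := cs.filter (fun c => !(PySem.Chars.isalnum c || PySem.Chars.isspace c))
  let pd := nonAlNums.foldl (fun d c =>
      if d.contains (String.ofList [c]) then d.insert (String.ofList [c]) (d.getD (String.ofList [c]) 0 + 1)
      else d.insert (String.ofList [c]) 1) PySem.Dict.empty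
  (pvMerge wd pd).items

-- ===== PORT B =====
-- one step of B's single loop; state = (current word buffer, word counts, punctuation counts)
def pvStepB (s : List Char × PySem.Dict String Int × PySem.Dict String Int) (c : Char) :
    List Char × PySem.Dict String Int × PySem.Dict String Int :=
  if PySem.Chars.isalnum c || PySem.Chars.isspace c then
    if c = ' ' then
      ([], s.2.1.insert (String.ofList s.1) (s.2.1.getD (String.ofList s.1) 0 + 1), s.2.2)
    else (s.1 ++ [c], s.2.1, s.2.2)
  else (s.1, s.2.1, s.2.2.insert (String.ofList [c]) (s.2.2.getD (String.ofList [c]) 0 + 1))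

def count_occurences2_alt (sentence : String) : List (String × Int) :=
  let st := sentence.toList.foldl pvStepB ([], PySem.Dict.empty, PySem.Dict.empty)
  let wd := st.2.1.insert (String.ofList st.1) (st.2.1.getD (String.ofList st.1) 0 + 1)
  (pvMerge wd st.2.2).items

-- ===== PRECONDITION & SPEC =====
def Spec_count_occurences2 (sentence : String) (out : List (String × Int)) : Prop := out = count_occurences2_alt sentence
instance (sentence : String) (out : List (String × Int)) : Decidable (Spec_count_occurences2 sentence out) := by unfold Spec_count_occurences2; infer_instance

-- ===== CLAIM (what is proved, stated in full; the proofs are below) =====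
def Claim_equal_count_occurences2 : Prop := ∀ (sentence : String), Dom_count_occurences2 sentence → Spec_count_occurences2 sentence (count_occurences2 sentence)

-- ===== LEMMAS AND PROOFS =====

-- counter increment d[k] = d.get(k, 0) + 1
def pvIncr (d : PySem.Dict String Int) (w : String) : PySem.Dict String Int :=
  d.insert w (d.getD w 0 + 1)

-- the simple structural form of splitting on the space character
def pvSplit : List Char → List (List Char)
  | [] => [[]]
  | c :: rest =>
    if c = ' ' then [] :: pvSplit rest
    else match pvSplit rest with
      | [] => [[c]]
      | h :: t => (c :: h) :: t

def pvConsPrefix (b : List Char) : List (List Char) → List (List Char)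
  | [] => [b]
  | h :: t => (b ++ h) :: t

-- B's word-side step (buffer, word counter)
def pvStepW (s : List Char × PySem.Dict String Int) (c : Char) :
    List Char × PySem.Dict String Int :=
  if c = ' ' then ([], pvIncr s.2 (String.ofList s.1)) else (s.1 ++ [c], s.2)

theorem pvSplit_ne_nil (l : List Char) : pvSplit l ≠ [] := by
  cases l with
  | nil => simp [pvSplit]
  | cons c rest =>
    simp only [pvSplit]
    split
    · simp
    · split <;> simp

theorem pvSplit_cons_exists (l : List Char) : ∃ h t, pvSplit l = h :: t := by
  cases hr : pvSplit l with
  | nil => exact absurd hr (pvSplit_ne_nil l)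
  | cons h t => exact ⟨h, t, rfl⟩

theorem pvSplitOn_go_eq (l : List Char) : ∀ (fuel : Nat) (cur : List Char)
    (acc : List (List Char)), l.length ≤ fuel →
    PySem.Chars.splitOn.go [' '] fuel l cur acc
      = acc.reverse ++ pvConsPrefix cur.reverse (pvSplit l) := by
  induction l with
  | nil =>
    intro fuel cur acc _
    cases fuel <;> simp [PySem.Chars.splitOn.go, pvSplit, pvConsPrefix]
  | cons c rest ih =>
    intro fuel cur acc hf
    cases fuel with
    | zero => simp at hf
    | succ f =>
      rw [PySem.Chars.splitOn.go.eq_def]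
      simp only []
      obtain ⟨h, t, hht⟩ := pvSplit_cons_exists rest
      by_cases hc : c = ' '
      · have hpre : List.isPrefixOf [' '] (c :: rest) = true := by
          simp [List.isPrefixOf, hc]
        rw [if_pos hpre]
        have hdrop : List.drop (List.length [' ']) (c :: rest) = rest := by simp
        rw [hdrop, ih f [] (cur.reverse :: acc) (by simpa using Nat.le_of_succ_le_succ hf)]
        simp [pvSplit, hc, hht, pvConsPrefix]
      · have hpre : List.isPrefixOf [' '] (c :: rest) = false := by
          simp [List.isPrefixOf]
          intro h; exact absurd h.symm hc
        rw [if_neg (by simp [hpre])]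
        rw [ih f (c :: cur) acc (by simpa using Nat.le_of_succ_le_succ hf)]
        simp [pvSplit, hc, hht, pvConsPrefix]

theorem pvSplitOn_eq (l : List Char) : PySem.Chars.splitOn l [' '] = pvSplit l := by
  obtain ⟨h, t, hht⟩ := pvSplit_cons_exists l
  have := pvSplitOn_go_eq l (l.length + 1) [] [] (Nat.le_succ _)
  simpa [PySem.Chars.splitOn, pvConsPrefix, hht] using this

-- A's branching counter body is pvIncr
theorem pvCountStep_eq (d : PySem.Dict String Int) (w : String) :
    (if d.contains w then d.insert w (d.getD w 0 + 1) else d.insert w 1) = pvIncr d w := by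
  by_cases h : d.contains w = true
  · simp [h, pvIncr]
  · have h' : d.contains w = false := by simpa using h
    simp [h', pvIncr, PySem.Dict.getD_of_not_contains d 0 h']

-- B's one loop is the word-side loop over the kept chars and the punctuation loop over the rest
theorem pvFoldB_split (cs : List Char) : ∀ (buf : List Char)
    (wd pd : PySem.Dict String Int),
    cs.foldl pvStepB (buf, wd, pd)
      = (((cs.filter (fun c => PySem.Chars.isalnum c || PySem.Chars.isspace c)).foldl pvStepW (buf, wd)).1,
         ((cs.filter (fun c => PySem.Chars.isalnum c || PySem.Chars.isspace c)).foldl pvStepW (buf, wd)).2,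
         (cs.filter (fun c => !(PySem.Chars.isalnum c || PySem.Chars.isspace c))).foldl
           (fun d c => pvIncr d (String.ofList [c])) pd) := by
  induction cs with
  | nil => intro buf wd pd; simp
  | cons c rest ih =>
    intro buf wd pd
    by_cases hp : (PySem.Chars.isalnum c || PySem.Chars.isspace c) = true
    · have hb : pvStepB (buf, wd, pd) c = ((pvStepW (buf, wd) c).1, (pvStepW (buf, wd) c).2, pd) := by
        simp only [pvStepB, pvStepW, pvIncr, hp, if_true]
        split <;> simp
      rw [List.foldl_cons, hb]
      simp only [List.filter_cons, hp, Bool.not_true, if_true]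
      rw [ih (pvStepW (buf, wd) c).1 (pvStepW (buf, wd) c).2 pd]
      simp
    · have hp' : (PySem.Chars.isalnum c || PySem.Chars.isspace c) = false := by simpa using hp
      have hb : pvStepB (buf, wd, pd) c = (buf, wd, pvIncr pd (String.ofList [c])) := by
        simp [pvStepB, pvIncr, hp']
      rw [List.foldl_cons, hb]
      simp only [List.filter_cons, hp', Bool.not_false, if_true]
      rw [ih buf wd (pvIncr pd (String.ofList [c]))]
      simp

-- finalizing B's word loop counts exactly the split segments (the buffer prefixes the first one)
theorem pvWord_inv (ws : List Char) : ∀ (buf : List Char) (wd : PySem.Dict String Int),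
    pvIncr (ws.foldl pvStepW (buf, wd)).2 (String.ofList (ws.foldl pvStepW (buf, wd)).1)
      = (pvConsPrefix buf (pvSplit ws)).foldl (fun d w => pvIncr d (String.ofList w)) wd := by
  induction ws with
  | nil => intro buf wd; simp [pvSplit, pvConsPrefix]
  | cons c rest ih =>
    intro buf wd
    obtain ⟨h, t, hht⟩ := pvSplit_cons_exists rest
    by_cases hc : c = ' '
    · have hstep : pvStepW (buf, wd) c = ([], pvIncr wd (String.ofList buf)) := by
        simp [pvStepW, hc]
      simp only [List.foldl_cons, hstep, ih]
      simp [pvSplit, hc, hht, pvConsPrefix]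
    · have hstep : pvStepW (buf, wd) c = (buf ++ [c], wd) := by
        simp [pvStepW, hc]
      simp only [List.foldl_cons, hstep, ih]
      simp [pvSplit, hc, hht, pvConsPrefix]

-- ===== VERDICT (by name: the statement is the Claim_ definition above) =====
theorem count_occurences2_spec : Claim_equal_count_occurences2 := by
  intro sentence _
  unfold Spec_count_occurences2 count_occurences2 count_occurences2_alt
  simp only [pvCountStep_eq, pvSplitOn_eq, List.foldl_map,
    pvFoldB_split sentence.toList [] PySem.Dict.empty PySem.Dict.empty]
  obtain ⟨h, t, hht⟩ := pvSplit_cons_exists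
    (sentence.toList.filter (fun c => PySem.Chars.isalnum c || PySem.Chars.isspace c))
  have hw := pvWord_inv
    (sentence.toList.filter (fun c => PySem.Chars.isalnum c || PySem.Chars.isspace c))
    [] PySem.Dict.empty
  simp only [pvIncr] at hw
  rw [hw]
  simp [hht, pvConsPrefix, pvIncr, PySem.Dict.getD_empty]
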